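-- pv_equiv track=rewrite | github.com/saksham-jain177/AI-Agent-based-Deep-Research | vector_store.py | _determine_ttl_category
-- ===== SOURCE A (Python) =====
-- def _determine_ttl_category(text: str, url: str = "") -> str:
--     """
--     Determine if content is news (short TTL) or evergreen (long TTL).
--     Returns: 'news' or 'evergreen'
--     """
--     # News indicators
--     news_keywords = ['breaking', 'latest', 'today', 'yesterday', 'update',
--                     'announces', 'reported', 'news', 'current', 'recent']
--     news_domains = ['reuters.com', 'bloomberg.com', 'cnn.com', 'bbc.com',
--                    'apnews.com', 'theguardian.com']
--
--     text_lower = text.lower()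
--     url_lower = url.lower()
--
--     # Check for news indicators
--     is_news = (
--         any(keyword in text_lower[:200] for keyword in news_keywords) or
--         any(domain in url_lower for domain in news_domains)
--     )
--
--     return 'news' if is_news else 'evergreen'
-- ===== SOURCE B (Python) =====
-- def _determine_ttl_category(text: str, url: str = "") -> str:
--     """
--     Determine if content is news (short TTL) or evergreen (long TTL).
--     Returns: 'news' or 'evergreen'
--     """
--     news_keywords = ['breaking', 'latest', 'today', 'yesterday', 'update',
--                      'announces', 'reported', 'news', 'current', 'recent']
--     news_domains = ['reuters.com', 'bloomberg.com', 'cnn.com', 'bbc.com',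
--                     'apnews.com', 'theguardian.com']
--
--     def _scan(s, patterns):
--         # single left-to-right pass over positions: at each position check
--         # whether any pattern starts there (position-major, not pattern-major)
--         for i in range(len(s)):
--             for p in patterns:
--                 if s.startswith(p, i):
--                     return True
--         return False
--
--     if _scan(text.lower()[:200], news_keywords) or _scan(url.lower(), news_domains):
--         return 'news'
--     return 'evergreen'
-- ===== Notes on version B (the rewrite author's own statement) =====
-- stated objective: alternative
-- what changed: Replaces A's keyword-major check, where each keyword rescans the whole snippet/url, by one position-major left-to-right pass that at each index tests whether any keyword (resp. domain) starts there.
import Mathlib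
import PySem

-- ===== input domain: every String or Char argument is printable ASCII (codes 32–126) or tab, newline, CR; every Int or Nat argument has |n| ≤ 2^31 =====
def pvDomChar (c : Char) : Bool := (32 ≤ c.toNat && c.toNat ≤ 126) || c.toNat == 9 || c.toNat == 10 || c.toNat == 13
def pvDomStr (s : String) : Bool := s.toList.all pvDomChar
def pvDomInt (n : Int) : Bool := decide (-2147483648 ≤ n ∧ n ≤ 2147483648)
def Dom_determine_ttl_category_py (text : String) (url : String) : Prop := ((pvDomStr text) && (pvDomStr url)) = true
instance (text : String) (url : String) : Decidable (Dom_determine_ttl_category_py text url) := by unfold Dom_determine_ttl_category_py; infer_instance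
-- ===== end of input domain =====

-- B replaces keyword-major substring scans by one position-major pass checking prefixes at each index (alternative decomposition, same cost).


def pvNewsKeywords : List String :=
  ["breaking", "latest", "today", "yesterday", "update",
   "announces", "reported", "news", "current", "recent"]
def pvNewsDomains : List String :=
  ["reuters.com", "bloomberg.com", "cnn.com", "bbc.com",
   "apnews.com", "theguardian.com"]

-- ===== PORT A =====
-- Python 'needle in hay' on strings: needle occurs as a contiguous substring.
def pvHasSub (n : List Char) : List Char → Bool
  | [] => n.isEmpty
  | c :: t => n.isPrefixOf (c :: t) || pvHasSub n t

def determine_ttl_category_py (text : String) (url : String) : String :=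
  let text_lower := (PySem.Str.lower text).toList
  let url_lower := (PySem.Str.lower url).toList
  let is_news :=
    (pvNewsKeywords.any (fun kw => pvHasSub kw.toList (PySem.List.slice text_lower none (some 200)))) ||
    (pvNewsDomains.any (fun d => pvHasSub d.toList url_lower))
  if is_news then "news" else "evergreen"

-- ===== PORT B =====
-- B's _scan: one pass over positions; at each position check whether any pattern starts there.
def pvScan (pats : List (List Char)) : List Char → Bool
  | [] => false
  | c :: t => pats.any (fun p => p.isPrefixOf (c :: t)) || pvScan pats t

def determine_ttl_category_py_alt (text : String) (url : String) : String :=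
  if pvScan (pvNewsKeywords.map String.toList) (PySem.List.slice (PySem.Str.lower text).toList none (some 200)) ||
     pvScan (pvNewsDomains.map String.toList) (PySem.Str.lower url).toList
  then "news" else "evergreen"

-- ===== PRECONDITION & SPEC =====
def Spec_determine_ttl_category_py (text : String) (url : String) (out : String) : Prop := out = determine_ttl_category_py_alt text url
instance (text : String) (url : String) (out : String) : Decidable (Spec_determine_ttl_category_py text url out) := by unfold Spec_determine_ttl_category_py; infer_instance

-- ===== CLAIM (what is proved, stated in full; the proofs are below) =====
def Claim_equal_determine_ttl_category_py : Prop := ∀ (text : String) (url : String), Dom_determine_ttl_category_py text url → Spec_determine_ttl_category_py text url (determine_ttl_category_py text url)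

-- ===== LEMMAS AND PROOFS =====

theorem pv_any_or_distrib {α : Type} (l : List α) (f g : α → Bool) :
    l.any (fun x => f x || g x) = (l.any f || l.any g) := by
  induction l with
  | nil => rfl
  | cons a t ih =>
    simp only [List.any_cons, ih]
    cases f a <;> cases g a <;> simp

-- keyword-major containment = position-major scan, for nonempty patterns
theorem pv_any_hasSub_eq_scan (pats : List (List Char)) (h : ∀ p ∈ pats, p ≠ []) (s : List Char) :
    pats.any (fun p => pvHasSub p s) = pvScan pats s := by
  induction s with
  | nil =>
    simp only [pvScan, pvHasSub, List.any_eq_false]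
    intro p hp
    simp [List.isEmpty_iff, h p hp]
  | cons c t ih =>
    simp only [pvScan, pvHasSub]
    rw [pv_any_or_distrib, ih]

theorem pv_anyStr_eq_scan (pats : List String) (h : ∀ p ∈ pats, p.toList ≠ []) (s : List Char) :
    pats.any (fun p => pvHasSub p.toList s) = pvScan (pats.map String.toList) s := by
  rw [← pv_any_hasSub_eq_scan (pats.map String.toList) (by simpa using h) s, List.any_map]
  rfl

-- ===== VERDICT (by name: the statement is the Claim_ definition above) =====
theorem determine_ttl_category_py_spec : Claim_equal_determine_ttl_category_py := by
  intro text url _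
  show determine_ttl_category_py text url = determine_ttl_category_py_alt text url
  simp only [determine_ttl_category_py, determine_ttl_category_py_alt,
    pv_anyStr_eq_scan pvNewsKeywords (by decide), pv_anyStr_eq_scan pvNewsDomains (by decide)]
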